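-- pv_equiv track=rewrite | github.com/joseignacioLS/a5_booklet | booklet.py | get_ordered_indexes
-- ===== SOURCE A (Python) =====
-- import math
--
-- def get_sheet_side_indexes(
--         base_index,
--         side_index,
--         sheets_per_signature,
--         total_pages
-- ):
--     even_modifier = sheets_per_signature * 4 - side_index - 1
--     odd_modifier = side_index
--     left_page = (base_index + (even_modifier if side_index % 2 == 0 else odd_modifier))
--     right_page = (base_index + (odd_modifier if side_index % 2 == 0 else even_modifier))
--     if left_page >= total_pages:
--         left_page = None
--     if right_page >= total_pages:
--         right_page = None
--     return [left_page, right_page]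
--
-- def get_signature_indexes(
--         signature_index,
--         sheets_per_signature,
--         pages_per_signature,
--         total_pages
-- ):
--     signature_indexes = []
--     base_index = signature_index * pages_per_signature
--     for side_index in range(sheets_per_signature * 2):
--         signature_indexes += get_sheet_side_indexes(
--             base_index,
--             side_index,
--             sheets_per_signature,
--             total_pages
--         )
--     return signature_indexes
--
-- def get_ordered_indexes(
--         total_pages,
--         sheets_per_signature=1
-- ):
--     indexes = []
--     pages_per_signature = sheets_per_signature * 4
--     number_of_signatures = math.ceil(total_pages / pages_per_signature)
--     for signature_index in range(number_of_signatures):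
--         indexes += get_signature_indexes(
--             signature_index,
--             sheets_per_signature,
--             pages_per_signature,
--             total_pages
--         )
--     return indexes
-- ===== SOURCE B (Python) =====
-- def get_ordered_indexes(total_pages, sheets_per_signature=1):
--     # Three-stage pipeline: (1) round the page count up to whole signatures and lay the
--     # pages out in contiguous chunks; (2) impose each chunk by consuming it from both
--     # ends at once (a forward and a backward iterator), four pages per sheet side pair;
--     # (3) clamp the padding pages to None in one final pass.
--     pages_per_signature = sheets_per_signature * 4
--     padded = total_pages + (-total_pages) % pages_per_signature
--     order = []
--     for base in range(0, padded, pages_per_signature):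
--         sheet = range(base, base + pages_per_signature)
--         fwd = iter(sheet)
--         bwd = reversed(sheet)
--         for _ in range(len(sheet) // 4):
--             outer_back = next(bwd)
--             front_a = next(fwd)
--             front_b = next(fwd)
--             inner_back = next(bwd)
--             order += [outer_back, front_a, front_b, inner_back]
--     return [i if i < total_pages else None for i in order]
-- ===== Notes on version B (the rewrite author's own statement) =====
-- stated objective: alternative
-- what changed: Replaces the three-function closed-form per-slot modular scheme with a three-stage pipeline: round the page count up to whole signatures, impose each contiguous chunk by consuming it from both ends at once through a forward and a backward iterator (four pages per peel, no per-side index formula), then clamp the padding pages to None in one final pass.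
import Mathlib
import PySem

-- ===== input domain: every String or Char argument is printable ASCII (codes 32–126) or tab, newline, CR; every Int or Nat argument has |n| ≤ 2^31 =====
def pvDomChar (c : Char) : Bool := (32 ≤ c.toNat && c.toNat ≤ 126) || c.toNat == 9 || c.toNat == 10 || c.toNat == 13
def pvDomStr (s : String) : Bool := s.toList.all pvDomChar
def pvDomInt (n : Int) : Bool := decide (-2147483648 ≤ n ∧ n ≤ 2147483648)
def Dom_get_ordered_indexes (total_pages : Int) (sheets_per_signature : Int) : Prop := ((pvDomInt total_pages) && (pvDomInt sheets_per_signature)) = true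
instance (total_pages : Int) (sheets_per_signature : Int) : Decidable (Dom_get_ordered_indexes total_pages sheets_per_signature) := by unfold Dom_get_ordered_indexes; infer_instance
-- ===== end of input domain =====

-- B replaces the three-helper per-slot modular scheme by a three-stage pipeline: pad the page
-- count to whole signatures, impose each chunk by peeling pages off a shrinking list, then
-- clamp padding pages to None in one final pass (alternative decomposition, same cost).

-- ===== PORT A =====
def get_sheet_side_indexes (base_index side_index sheets_per_signature total_pages : Int) :
    List (Option Int) :=
  let even_modifier := sheets_per_signature * 4 - side_index - 1
  let odd_modifier := side_index
  let left_page := base_index +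
    (if PySem.Int.mod side_index 2 = 0 then even_modifier else odd_modifier)
  let right_page := base_index +
    (if PySem.Int.mod side_index 2 = 0 then odd_modifier else even_modifier)
  [(if left_page ≥ total_pages then none else some left_page),
   (if right_page ≥ total_pages then none else some right_page)]

def get_signature_indexes (signature_index sheets_per_signature pages_per_signature total_pages : Int) :
    List (Option Int) :=
  let base_index := signature_index * pages_per_signature
  (PySem.List.pyRange 0 (sheets_per_signature * 2) 1).foldl
    (fun acc side_index =>
      acc ++ get_sheet_side_indexes base_index side_index sheets_per_signature total_pages) []

def get_ordered_indexes (total_pages : Int) (sheets_per_signature : Int) : List (Option Int) :=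
  let pages_per_signature := sheets_per_signature * 4
  -- math.ceil(total_pages / pages_per_signature): ported as the integer ceiling, which is
  -- exact on the stated domain (|ints| ≤ 2^31, so the float quotient never crosses an integer)
  let number_of_signatures := -(PySem.Int.floordiv (-total_pages) pages_per_signature)
  (PySem.List.pyRange 0 number_of_signatures 1).foldl
    (fun acc signature_index =>
      acc ++ get_signature_indexes signature_index sheets_per_signature pages_per_signature total_pages) []

-- ===== PORT B =====
-- Source B's inner quad loop: fwd/bwd hold the forward and the backward iterator's remaining
-- elements; the pyGetD defaults are never the result, since the loop runs len(sheet)//4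
-- times, so both iterators always hold enough elements (exactly as in the Python).
def pv_quads : Nat → List Int → List Int → List Int
  | 0, _, _ => []
  | k + 1, fwd, bwd =>
      [PySem.List.pyGetD bwd 0 0, PySem.List.pyGetD fwd 0 0,
       PySem.List.pyGetD fwd 1 0, PySem.List.pyGetD bwd 1 0] ++
      pv_quads k (fwd.drop 2) (bwd.drop 2)

def get_ordered_indexes_alt (total_pages : Int) (sheets_per_signature : Int) : List (Option Int) :=
  let pages_per_signature := sheets_per_signature * 4
  let padded := total_pages + PySem.Int.mod (-total_pages) pages_per_signature
  let order := (PySem.List.pyRange 0 padded pages_per_signature).foldl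
    (fun order base =>
      let sheet := PySem.List.pyRange base (base + pages_per_signature) 1
      order ++ pv_quads (PySem.Int.floordiv (sheet.length : Int) 4).toNat sheet sheet.reverse) []
  order.map (fun i => if i < total_pages then some i else none)

-- ===== PRECONDITION & SPEC =====
-- Pre_ excludes exactly sheets_per_signature = 0, on which the Python A raises ZeroDivisionError.
def Pre_get_ordered_indexes (total_pages : Int) (sheets_per_signature : Int) : Prop :=
  sheets_per_signature ≠ 0
instance (total_pages : Int) (sheets_per_signature : Int) : Decidable (Pre_get_ordered_indexes total_pages sheets_per_signature) := by unfold Pre_get_ordered_indexes; infer_instance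
def pvWitness_get_ordered_indexes : Int × Int := (10, 1)

def Spec_get_ordered_indexes (total_pages : Int) (sheets_per_signature : Int) (out : List (Option Int)) : Prop := out = get_ordered_indexes_alt total_pages sheets_per_signature
instance (total_pages : Int) (sheets_per_signature : Int) (out : List (Option Int)) : Decidable (Spec_get_ordered_indexes total_pages sheets_per_signature out) := by unfold Spec_get_ordered_indexes; infer_instance

-- ===== CLAIM (what is proved, stated in full; the proofs are below) =====
def Claim_equal_get_ordered_indexes : Prop := ∀ (total_pages : Int) (sheets_per_signature : Int), Dom_get_ordered_indexes total_pages sheets_per_signature → Pre_get_ordered_indexes total_pages sheets_per_signature → Spec_get_ordered_indexes total_pages sheets_per_signature (get_ordered_indexes total_pages sheets_per_signature)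

-- ===== LEMMAS AND PROOFS =====

-- Source B's quad loop on the two iterators of a contiguous chunk equals the flatMap of
-- A's raw (unclamped) side pairs
lemma pv_quads_eq (k : Nat) : ∀ (j b p : Int), 0 ≤ j → PySem.Int.mod j 2 = 0 →
    p = 2 * j + 4 * (k : Int) →
    pv_quads k (PySem.List.pyRange (b + j) (b + p) 1)
      (PySem.List.pyRange (b + p - 1 - j) (b - 1) (-1))
    = (PySem.List.pyRange j (j + 2 * (k : Int)) 1).flatMap (fun i =>
        if PySem.Int.mod i 2 = 0 then [b + p - 1 - i, b + i] else [b + i, b + p - 1 - i]) := by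
  induction k with
  | zero =>
    intro j b p hj0 hj hp
    have h0 : PySem.List.pyRange j (j + 2 * ((0 : Nat) : Int)) 1 = [] :=
      PySem.List.pyRange_one_eq_nil (by push_cast; omega)
    rw [h0]
    rfl
  | succ k ih =>
    intro j b p hj0 hj hp
    have hk : ((k + 1 : Nat) : Int) = (k : Int) + 1 := by push_cast; ring
    have hje : (2 : Int) ∣ j := (PySem.Int.mod_eq_zero_iff_dvd j 2).mp hj
    have hj1 : PySem.Int.mod (j + 1) 2 ≠ 0 := by
      intro h
      have := (PySem.Int.mod_eq_zero_iff_dvd (j + 1) 2).mp h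
      omega
    have hj2 : PySem.Int.mod (j + 2) 2 = 0 :=
      (PySem.Int.mod_eq_zero_iff_dvd (j + 2) 2).mpr (by omega)
    have hpk : p = 2 * j + 4 * (k : Int) + 4 := by rw [hp, hk]; ring
    -- peel the first two sides off the right-hand side
    have erhs : PySem.List.pyRange j (j + 2 * ((k + 1 : Nat) : Int)) 1 =
        j :: (j + 1) :: PySem.List.pyRange (j + 2) (j + 2 + 2 * (k : Int)) 1 := by
      rw [PySem.List.pyRange_one_cons (by omega), PySem.List.pyRange_one_cons (by omega),
          show j + 1 + 1 = j + 2 by ring,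
          show j + 2 * ((k + 1 : Nat) : Int) = j + 2 + 2 * (k : Int) by rw [hk]; ring]
    rw [erhs]
    simp only [List.flatMap_cons, if_pos hj, if_neg hj1]
    -- expose the next two elements of each iterator
    rw [PySem.List.pyRange_one_cons (show b + j < b + p by omega),
        PySem.List.pyRange_one_cons (show b + j + 1 < b + p by omega),
        PySem.List.pyRange_neg_one_cons (show b - 1 < b + p - 1 - j by omega),
        PySem.List.pyRange_neg_one_cons (show b - 1 < b + p - 1 - j - 1 by omega)]
    simp only [pv_quads, List.drop_succ_cons, List.drop_zero,
               PySem.List.pyGetD_ofNat', List.getD_cons_succ, List.getD_cons_zero]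
    rw [show b + j + 1 + 1 = b + (j + 2) by ring,
        show b + p - 1 - j - 1 - 1 = b + p - 1 - (j + 2) by ring,
        show b + p = b + (2 * (j + 2) + 4 * (k : Int)) by omega]
    rw [ih (j + 2) b (2 * (j + 2) + 4 * (k : Int)) (by omega) hj2 rfl]
    simp
    omega

-- clamping B's raw pair at side i gives exactly A's helper's output
lemma pv_pair_eq (tp s base j : Int) :
    (if PySem.Int.mod j 2 = 0 then [base + s * 4 - 1 - j, base + j]
     else [base + j, base + s * 4 - 1 - j]).map
      (fun v => if v < tp then some v else none)
    = get_sheet_side_indexes base j s tp := by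
  have h1 : base + s * 4 - 1 - j = base + (s * 4 - j - 1) := by ring
  have hc : ∀ v : Int, (if v < tp then (some v : Option Int) else none)
      = (if v ≥ tp then none else some v) := by
    intro v; split_ifs <;> first | rfl | omega
  by_cases h : PySem.Int.mod j 2 = 0 <;>
    simp only [get_sheet_side_indexes, h, if_true, if_false, List.map_cons, List.map_nil, hc, h1]

-- one signature: B's imposed-and-clamped chunk is A's signature block (positive sheet count)
lemma pv_chunk_eq (tp s sig : Int) (hs : 1 ≤ s) :
    (pv_quads
        (PySem.Int.floordiv
          (((PySem.List.pyRange (sig * (s * 4)) (sig * (s * 4) + s * 4) 1).length : Int)) 4).toNat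
        (PySem.List.pyRange (sig * (s * 4)) (sig * (s * 4) + s * 4) 1)
        (PySem.List.pyRange (sig * (s * 4)) (sig * (s * 4) + s * 4) 1).reverse).map
      (fun v => if v < tp then some v else none)
    = get_signature_indexes sig s (s * 4) tp := by
  unfold get_signature_indexes
  rw [PySem.List.foldl_append_eq_flatMap, List.nil_append]
  have hk : ((s.toNat : Nat) : Int) = s := by omega
  have hlen : ((PySem.List.pyRange (sig * (s * 4)) (sig * (s * 4) + s * 4) 1).length : Int)
      = s * 4 := by
    rw [PySem.List.length_pyRange_one]; omega
  have hcnt : (PySem.Int.floordiv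
      (((PySem.List.pyRange (sig * (s * 4)) (sig * (s * 4) + s * 4) 1).length : Int)) 4).toNat
      = s.toNat := by
    rw [hlen, PySem.Int.floordiv_eq_ediv_of_pos (by omega),
        show s * 4 = 4 * s by ring, Int.mul_ediv_cancel_left s (by omega)]
  have hrev : (PySem.List.pyRange (sig * (s * 4)) (sig * (s * 4) + s * 4) 1).reverse
      = PySem.List.pyRange (sig * (s * 4) + s * 4 - 1) (sig * (s * 4) - 1) (-1) := by
    rw [PySem.List.pyRange_neg_one_eq_reverse,
        show sig * (s * 4) - 1 + 1 = sig * (s * 4) by ring,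
        show sig * (s * 4) + s * 4 - 1 + 1 = sig * (s * 4) + s * 4 by ring]
  rw [hcnt, hrev]
  have h := pv_quads_eq s.toNat 0 (sig * (s * 4)) (s * 4) (le_refl 0) (by decide) (by rw [hk]; ring)
  simp only [add_zero, sub_zero, zero_add] at h
  rw [hk] at h
  rw [show s * 2 = 2 * s by ring, h, List.map_flatMap]
  exact List.flatMap_congr (fun i _ => pv_pair_eq tp s (sig * (s * 4)) i)

-- ===== VERDICT (by name: the statement is the Claim_ definition above) =====
theorem get_ordered_indexes_spec : Claim_equal_get_ordered_indexes := by
  intro tp s _ hs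
  simp only [Spec_get_ordered_indexes, get_ordered_indexes, get_ordered_indexes_alt]
  rw [PySem.List.foldl_append_eq_flatMap, PySem.List.foldl_append_eq_flatMap, List.nil_append,
      List.nil_append, List.map_flatMap]
  have hs' : s ≠ 0 := hs
  rcases lt_or_gt_of_ne hs' with hneg | hpos
  · -- s ≤ -1: every signature block and every chunk is empty
    have hA : ∀ sig, get_signature_indexes sig s (s * 4) tp = [] := by
      intro sig
      unfold get_signature_indexes
      rw [PySem.List.pyRange_one_eq_nil (by omega)]; rfl
    have hB : ∀ base : Int,
        ((fun sheet => pv_quads (PySem.Int.floordiv ((sheet.length : Int)) 4).toNat sheet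
            sheet.reverse) (PySem.List.pyRange base (base + s * 4) 1)).map
          (fun i => if i < tp then some i else none) = [] := by
      intro base
      rw [PySem.List.pyRange_one_eq_nil (by omega)]
      have hc : (PySem.Int.floordiv ((([] : List Int).length : Int)) 4).toNat = 0 := by
        rw [PySem.Int.floordiv_eq_ediv_of_pos (by omega)]; simp
      simp only [hc]
      rfl
    exact Eq.trans (List.flatMap_eq_nil_iff.mpr fun sig _ => hA sig)
      (Eq.symm (List.flatMap_eq_nil_iff.mpr fun base _ => hB base))
  · -- 1 ≤ s
    have hp : (0 : Int) < s * 4 := by omega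
    have hpad : tp + PySem.Int.mod (-tp) (s * 4)
        = -(PySem.Int.floordiv (-tp) (s * 4)) * (s * 4) := by
      linear_combination PySem.Int.floordiv_mul_add_mod (-tp) (s * 4)
    set N := -(PySem.Int.floordiv (-tp) (s * 4)) with hN
    rw [hpad, PySem.List.pyRange_of_pos 0 (N * (s * 4)) hp, PySem.List.pyRange_one 0 N]
    have hcnt : (if (0 : Int) < N * (s * 4) then ((N * (s * 4) - 0 + s * 4 - 1) / (s * 4)).toNat else 0)
        = N.toNat := by
      by_cases h : (0 : Int) < N * (s * 4)
      · rw [if_pos h]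
        have hNpos : 0 < N := by by_contra hc; push Not at hc; nlinarith
        rw [show N * (s * 4) - 0 + s * 4 - 1 = (s * 4 - 1) + N * (s * 4) by ring,
            Int.add_mul_ediv_right _ _ (by omega), Int.ediv_eq_zero_of_lt (by omega) (by omega)]
        omega
      · rw [if_neg h]
        have : N ≤ 0 := by nlinarith
        omega
    rw [hcnt, List.flatMap_map, List.flatMap_map, sub_zero]
    refine Eq.symm (List.flatMap_congr (fun k _ => ?_))
    rw [show (0 : Int) + s * 4 * (k : Int) = ((0 : Int) + (k : Int)) * (s * 4) by ring]
    exact pv_chunk_eq tp s ((0 : Int) + (k : Int)) (by omega)
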